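-- pv_equiv track=rewrite | github.com/blazejrypak/vinf-semestral-project | src/indexer.py | add2postingslist
-- ===== SOURCE A (Python) =====
-- def add2postingslist(tokens, fName, postingslist):
--     if any(postingslist):
--         for token, term in [(token, term) for token in tokens for term in postingslist.keys() if token == term]:
--             postingslist[term].append(fName)
--     else:
--         for token in tokens:
--             postingslist[token] = [fName]
--     return postingslist
-- ===== SOURCE B (Python) =====
-- def add2postingslist(tokens, fName, postingslist):
--     if any(postingslist):
--         for term in postingslist:
--             postingslist[term] = postingslist[term] + [fName] * tokens.count(term)
--     else:
--         for token in tokens: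
--             postingslist[token] = [fName]
--     return postingslist
-- ===== Notes on version B (the rewrite author's own statement) =====
-- stated objective: simpler
-- what changed: Replaces A's tokens-driven cross-product comprehension (one append per matching (token, key) pair) with a single rewrite pass over the postings entries, rebuilding each posting list as old + [fName] * tokens.count(term); Pre_ only excludes Lean-level association lists with duplicate keys, which cannot arise from a Python dict.
import Mathlib
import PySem

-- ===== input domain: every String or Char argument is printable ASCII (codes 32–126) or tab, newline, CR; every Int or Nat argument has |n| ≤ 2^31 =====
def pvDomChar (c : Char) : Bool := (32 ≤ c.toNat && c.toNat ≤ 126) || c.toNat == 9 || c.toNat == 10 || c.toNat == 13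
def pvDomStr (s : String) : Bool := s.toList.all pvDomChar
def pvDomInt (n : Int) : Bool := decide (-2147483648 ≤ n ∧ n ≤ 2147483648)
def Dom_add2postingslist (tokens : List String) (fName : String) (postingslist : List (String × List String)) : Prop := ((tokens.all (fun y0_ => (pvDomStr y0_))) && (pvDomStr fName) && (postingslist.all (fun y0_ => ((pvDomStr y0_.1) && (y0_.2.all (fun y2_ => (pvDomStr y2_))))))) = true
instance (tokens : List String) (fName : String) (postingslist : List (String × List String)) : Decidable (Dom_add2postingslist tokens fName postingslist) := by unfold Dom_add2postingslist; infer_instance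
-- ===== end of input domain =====

-- B replaces A's tokens-driven cross-product (one append per matching (token, key) pair) with a
-- single rewrite pass over the postings entries: each posting becomes old ++ [fName] * count (simpler).
-- Both A and B mutate `postingslist` in place in Python (the same mutation); the equivalence is about the return value.

-- ===== PORT A =====
-- dict primitives: `d[k].append(x)` = modify first entry with key k; `d[k] = v` = overwrite first match else append
def pvModFirst (k : String) (f : List String → List String) : List (String × List String) → List (String × List String)
  | [] => []
  | (k', v) :: rest => if k' = k then (k', f v) :: rest else (k', v) :: pvModFirst k f rest

def pvInsert : List (String × List String) → String → List String → List (String × List String)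
  | [], k, v => [(k, v)]
  | (k', v') :: rest, k, v => if k' = k then (k', v) :: rest else (k', v') :: pvInsert rest k v

def add2postingslist (tokens : List String) (fName : String) (postingslist : List (String × List String)) : List (String × List String) :=
  if postingslist.any (fun p => p.1 ≠ "") then
    -- [(token, term) for token in tokens for term in postingslist.keys() if token == term], then append per pair
    (tokens.flatMap (fun token => (postingslist.map Prod.fst).filter (fun term => token == term))).foldl
      (fun d term => pvModFirst term (fun v => v ++ [fName]) d) postingslist
  else
    tokens.foldl (fun d token => pvInsert d token [fName]) postingslist

-- ===== PORT B =====
def add2postingslist_alt (tokens : List String) (fName : String) (postingslist : List (String × List String)) : List (String × List String) :=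
  if postingslist.any (fun p => p.1 ≠ "") then
    -- for term in postingslist: postingslist[term] = postingslist[term] + [fName] * tokens.count(term)
    -- rewriting every existing entry in place, in order = a map over the entries
    postingslist.map (fun p => (p.1, p.2 ++ List.replicate (tokens.count p.1) fName))
  else
    tokens.foldl (fun d token => pvInsert d token [fName]) postingslist

-- ===== PRECONDITION & SPEC =====
-- Pre_ excludes association lists with duplicate keys: those cannot arise from a Python dict
-- (they are an artefact of the List-based dict encoding), and on them the two traversals differ.
def Pre_add2postingslist (tokens : List String) (fName : String) (postingslist : List (String × List String)) : Prop :=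
  (postingslist.map Prod.fst).Nodup
instance (tokens : List String) (fName : String) (postingslist : List (String × List String)) : Decidable (Pre_add2postingslist tokens fName postingslist) := by unfold Pre_add2postingslist; infer_instance

def pvWitness_add2postingslist : List String × String × (List (String × List String)) :=
  (["a", "b", "a"], "f1", [("a", ["f0"]), ("c", [])])

def Spec_add2postingslist (tokens : List String) (fName : String) (postingslist : List (String × List String)) (out : List (String × List String)) : Prop := out = add2postingslist_alt tokens fName postingslist
instance (tokens : List String) (fName : String) (postingslist : List (String × List String)) (out : List (String × List String)) : Decidable (Spec_add2postingslist tokens fName postingslist out) := by unfold Spec_add2postingslist; infer_instance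

-- ===== CLAIM =====
def Claim_equal_add2postingslist : Prop := ∀ (tokens : List String) (fName : String) (postingslist : List (String × List String)), Dom_add2postingslist tokens fName postingslist → Pre_add2postingslist tokens fName postingslist → Spec_add2postingslist tokens fName postingslist (add2postingslist tokens fName postingslist)

-- ===== LEMMAS AND PROOFS =====

theorem pvModFirst_id (k : String) (d : List (String × List String)) :
    pvModFirst k (fun v => v) d = d := by
  induction d with
  | nil => rfl
  | cons p rest ih => obtain ⟨k', v⟩ := p; by_cases h : k' = k <;> simp [pvModFirst, h, ih]

theorem pvModFirst_comp (k : String) (f g : List String → List String) (d : List (String × List String)) :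
    pvModFirst k g (pvModFirst k f d) = pvModFirst k (fun v => g (f v)) d := by
  induction d with
  | nil => rfl
  | cons p rest ih =>
    obtain ⟨k', v⟩ := p
    by_cases h : k' = k <;> simp [pvModFirst, h, ih]

-- the single-append operation is left-commutative
theorem pvMod_lcomm (fName : String) (d : List (String × List String)) (k k' : String) :
    pvModFirst k' (fun v => v ++ [fName]) (pvModFirst k (fun v => v ++ [fName]) d)
      = pvModFirst k (fun v => v ++ [fName]) (pvModFirst k' (fun v => v ++ [fName]) d) := by
  by_cases hkk : k = k'
  · subst hkk; rfl
  · induction d with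
    | nil => rfl
    | cons p rest ih =>
      obtain ⟨k0, v⟩ := p
      by_cases h : k0 = k <;> by_cases h' : k0 = k' <;>
        simp [pvModFirst, h, h', hkk, Ne.symm hkk, ih]

-- folding the append over a permuted op list gives the same dict
theorem pvFold_perm (fName : String) {l1 l2 : List String} (hp : l1.Perm l2) (d : List (String × List String)) :
    l1.foldl (fun d term => pvModFirst term (fun v => v ++ [fName]) d) d
      = l2.foldl (fun d term => pvModFirst term (fun v => v ++ [fName]) d) d := by
  induction hp generalizing d with
  | nil => rfl
  | cons x _ ih => simpa using ih _
  | swap x y l => simp [List.foldl, pvMod_lcomm fName d x y]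
  | trans _ _ ih1 ih2 => exact (ih1 d).trans (ih2 d)

-- a filter for equality with t is a replicate of t
theorem pvFilter_eq_replicate (t : String) (l : List String) :
    l.filter (fun term => t == term) = List.replicate (l.count t) t := by
  induction l with
  | nil => rfl
  | cons x rest ih =>
    by_cases h : x = t
    · subst h; simp [List.replicate_succ, ih]
    · simp [beq_iff_eq, h, Ne.symm h, ih]

theorem pvCount_flatMap_replicate (g : String → ℕ) (l : List String) (x : String) :
    (l.flatMap (fun t => List.replicate (g t) t)).count x = l.count x * g x := by
  induction l with
  | nil => simp
  | cons t rest ih =>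
    by_cases h : t = x
    · subst h
      simp only [List.flatMap_cons, List.count_append, List.count_replicate_self, ih,
        List.count_cons_self]
      ring
    · simp [List.count_append, List.count_replicate, ih, h, beq_iff_eq]

-- the two op multisets agree
theorem pvOps_perm (tokens keys : List String) :
    (tokens.flatMap (fun token => keys.filter (fun term => token == term))).Perm
      (keys.flatMap (fun k => List.replicate (tokens.count k) k)) := by
  rw [List.perm_iff_count]
  intro x
  have h1 : tokens.flatMap (fun token => keys.filter (fun term => token == term))
      = tokens.flatMap (fun token => List.replicate (keys.count token) token) := by
    apply List.flatMap_congr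
    intro t _
    exact pvFilter_eq_replicate t keys
  rw [h1, pvCount_flatMap_replicate (fun t => keys.count t) tokens x,
    pvCount_flatMap_replicate (fun k => tokens.count k) keys x, Nat.mul_comm]

-- folding n single appends = one extend by replicate n
theorem pvFold_replicate (fName : String) (k : String) (n : ℕ) (d : List (String × List String)) :
    (List.replicate n k).foldl (fun d term => pvModFirst term (fun v => v ++ [fName]) d) d
      = pvModFirst k (fun v => v ++ List.replicate n fName) d := by
  induction n generalizing d with
  | zero => simpa using (pvModFirst_id k d).symm
  | succ m ih =>
    rw [List.replicate_succ, List.foldl_cons, ih, pvModFirst_comp]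
    congr 1
    funext v
    simp [List.replicate_succ]

-- the fold over the replicated op list = a keys-driven fold of per-key extends
theorem pvFoldKeys (fName : String) (tokens keys : List String) (d : List (String × List String)) :
    (keys.flatMap (fun k => List.replicate (tokens.count k) k)).foldl
      (fun d term => pvModFirst term (fun v => v ++ [fName]) d) d
      = keys.foldl
          (fun d k => pvModFirst k (fun v => v ++ List.replicate (tokens.count k) fName) d) d := by
  induction keys generalizing d with
  | nil => rfl
  | cons k rest ih =>
    rw [List.flatMap_cons, List.foldl_append, List.foldl_cons, pvFold_replicate, ih]

-- a per-key fold skips an entry whose key it never touches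
theorem pvFoldl_cons_of_not_mem (F : String → List String → List String) (ts : List String)
    (p : String × List String) (d : List (String × List String)) (h : p.1 ∉ ts) :
    ts.foldl (fun d t => pvModFirst t (F t) d) (p :: d)
      = p :: ts.foldl (fun d t => pvModFirst t (F t) d) d := by
  induction ts generalizing d with
  | nil => rfl
  | cons t rest ih =>
    have hne : p.1 ≠ t := fun he => h (by simp [he])
    obtain ⟨k, v⟩ := p
    simp only [List.foldl_cons, pvModFirst, if_neg hne]
    exact ih (pvModFirst t (F t) d) (fun hm => h (by simp [hm]))

-- with distinct keys, folding per-key extends over a dict's own keys = a map over its entries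
theorem pvKeysFold_eq_map (F : String → List String → List String)
    (d : List (String × List String)) (hnd : (d.map Prod.fst).Nodup) :
    (d.map Prod.fst).foldl (fun d' t => pvModFirst t (F t) d') d
      = d.map (fun p => (p.1, F p.1 p.2)) := by
  induction d with
  | nil => rfl
  | cons p rest ih =>
    obtain ⟨k, v⟩ := p
    simp only [List.map_cons, List.nodup_cons] at hnd
    have hk : k ∉ rest.map Prod.fst := hnd.1
    simp only [List.map_cons, List.foldl_cons, pvModFirst]
    rw [if_pos trivial,
      pvFoldl_cons_of_not_mem F (rest.map Prod.fst) (k, F k v) rest hk, ih hnd.2]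

-- ===== VERDICT =====
theorem add2postingslist_spec : Claim_equal_add2postingslist := by
  intro tokens fName postingslist _ hnd
  unfold Spec_add2postingslist add2postingslist add2postingslist_alt
  split_ifs with hg
  · rw [pvFold_perm fName (pvOps_perm tokens (postingslist.map Prod.fst)) postingslist,
      pvFoldKeys fName tokens (postingslist.map Prod.fst) postingslist,
      pvKeysFold_eq_map (fun k v => v ++ List.replicate (tokens.count k) fName) postingslist hnd]
  · rfl
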